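-- pv_equiv track=rewrite | github.com/Dhulasiraman/bughunt-2024 | py/p3.py | delete_starting_evens
-- ===== SOURCE A (Python) =====
-- def delete_starting_evens(lst):
--     # Find the index of the first odd number
--     first_odd_index = 0
--     for item in lst:
--         if item % 2 == 0:
--             first_odd_index += 1
--         else:
--             break
--     # Slice the list from the first odd number to the end
--     return lst[first_odd_index:]
-- ===== SOURCE B (Python) =====
-- def delete_starting_evens(lst):
--     r = lst[::-1]
--     while r and r[-1] % 2 == 0:
--         r.pop()
--     return r[::-1]
-- ===== Notes on version B (the rewrite author's own statement) =====
-- stated objective: alternative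
-- what changed: B reverses the list, strips the now-trailing even elements by repeatedly popping from the end of the reversed copy, and reverses back, instead of counting a prefix index and slicing.
import Mathlib
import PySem

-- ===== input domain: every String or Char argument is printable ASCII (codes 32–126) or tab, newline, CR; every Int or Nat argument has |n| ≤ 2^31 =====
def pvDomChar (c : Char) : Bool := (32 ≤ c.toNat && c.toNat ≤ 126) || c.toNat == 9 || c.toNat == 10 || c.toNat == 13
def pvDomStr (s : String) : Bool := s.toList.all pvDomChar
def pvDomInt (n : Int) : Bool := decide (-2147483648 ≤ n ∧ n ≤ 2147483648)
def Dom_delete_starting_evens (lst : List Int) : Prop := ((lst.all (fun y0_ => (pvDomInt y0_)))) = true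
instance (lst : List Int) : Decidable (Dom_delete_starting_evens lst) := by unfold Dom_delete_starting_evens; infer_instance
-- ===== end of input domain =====

-- B reverses the list, strips the now-trailing evens by popping from the end of the copy, and reverses back, instead of A's prefix-index count plus slice; same cost, different traversal.

-- ===== PORT A =====
-- A's loop with break: count leading items with item % 2 == 0, stop at the first odd one.
def pvCountLeadingEvens (lst : List Int) (acc : Int) : Int :=
  match lst with
  | [] => acc
  | x :: xs => if PySem.Int.mod x 2 == 0 then pvCountLeadingEvens xs (acc + 1) else acc

def delete_starting_evens (lst : List Int) : List Int :=
  PySem.List.slice lst (some (pvCountLeadingEvens lst 0)) none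

-- ===== PORT B =====
-- B's while loop: `while r and r[-1] % 2 == 0: r.pop()`; r.pop() discards the last element (dropLast).
def pvStripTrailingEvens (r : List Int) : List Int :=
  if _hr : r = [] then r
  else
    match PySem.List.pyGet? r (-1) with
    | some x => if PySem.Int.mod x 2 == 0 then pvStripTrailingEvens r.dropLast else r
    | none => r
termination_by r.length
decreasing_by
  have : r ≠ [] := _hr
  have : 0 < r.length := List.length_pos_iff.mpr this
  simp [List.length_dropLast]; omega

def delete_starting_evens_alt (lst : List Int) : List Int :=
  let r := (PySem.List.slice? lst none none (-1)).getD []      -- lst[::-1] (always some)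
  let r := pvStripTrailingEvens r
  (PySem.List.slice? r none none (-1)).getD []                  -- r[::-1]

-- ===== PRECONDITION & SPEC =====
def Spec_delete_starting_evens (lst : List Int) (out : List Int) : Prop := out = delete_starting_evens_alt lst
instance (lst : List Int) (out : List Int) : Decidable (Spec_delete_starting_evens lst out) := by unfold Spec_delete_starting_evens; infer_instance

-- ===== CLAIM (what is proved, stated in full; the proofs are below) =====
def Claim_equal_delete_starting_evens : Prop := ∀ (lst : List Int), Dom_delete_starting_evens lst → Spec_delete_starting_evens lst (delete_starting_evens lst)

-- ===== LEMMAS AND PROOFS =====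
lemma pvCountLeadingEvens_shift (lst : List Int) (a : Int) :
    pvCountLeadingEvens lst a = a + pvCountLeadingEvens lst 0 := by
  induction lst generalizing a with
  | nil => simp [pvCountLeadingEvens]
  | cons x xs ih =>
    simp only [pvCountLeadingEvens]
    split_ifs with h
    · rw [ih (a + 1), ih (0 + 1)]; ring
    · ring

lemma pvCountLeadingEvens_nonneg (lst : List Int) : (0:Int) ≤ pvCountLeadingEvens lst 0 := by
  induction lst with
  | nil => simp [pvCountLeadingEvens]
  | cons y ys ihy =>
    simp only [pvCountLeadingEvens]
    split_ifs with hy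
    · rw [pvCountLeadingEvens_shift ys (0 + 1)]; omega
    · exact le_refl 0

lemma pvSlice_count_eq_dropWhile (lst : List Int) :
    PySem.List.slice lst (some (pvCountLeadingEvens lst 0)) none
      = lst.dropWhile (fun x => PySem.Int.mod x 2 == 0) := by
  induction lst with
  | nil => simp [pvCountLeadingEvens, PySem.List.slice_from _ (le_refl (0:Int))]
  | cons x xs ih =>
    rw [List.dropWhile_cons]
    simp only [pvCountLeadingEvens]
    split_ifs with h
    · rw [pvCountLeadingEvens_shift xs (0 + 1)]
      have hnn : (0:Int) ≤ pvCountLeadingEvens xs 0 := pvCountLeadingEvens_nonneg xs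
      rw [PySem.List.slice_from _ (by omega : (0:Int) ≤ 0 + 1 + pvCountLeadingEvens xs 0)]
      rw [show (0 + 1 + pvCountLeadingEvens xs 0).toNat = (pvCountLeadingEvens xs 0).toNat + 1 by omega]
      rw [List.drop_succ_cons, ← PySem.List.slice_from _ hnn]
      exact ih
    · rw [PySem.List.slice_from _ (le_refl (0:Int))]
      simp

lemma pvStrip_reverse (l : List Int) :
    pvStripTrailingEvens l.reverse
      = (l.dropWhile (fun x => PySem.Int.mod x 2 == 0)).reverse := by
  induction l with
  | nil => simp [pvStripTrailingEvens]
  | cons x xs ih =>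
    rw [List.reverse_cons, List.dropWhile_cons]
    rw [pvStripTrailingEvens]
    have hne : xs.reverse ++ [x] ≠ [] := by simp
    rw [dif_neg hne, PySem.List.pyGet?_neg_one_append_singleton]
    dsimp only
    split_ifs with h
    · rw [List.dropLast_concat]
      exact ih
    · rw [List.reverse_cons]

-- ===== VERDICT (by name: the statement is the Claim_ definition above) =====
theorem delete_starting_evens_spec : Claim_equal_delete_starting_evens := by
  intro lst _
  unfold Spec_delete_starting_evens delete_starting_evens delete_starting_evens_alt
  rw [pvSlice_count_eq_dropWhile]
  simp only [PySem.List.slice?_none_none_neg_one, Option.getD_some]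
  rw [pvStrip_reverse, List.reverse_reverse]
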